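-- pv_equiv track=rewrite | github.com/TRex22/random | Python/GraphTheory-FindPathOfLength3.py | gv
-- ===== SOURCE A (Python) =====
-- import copy
--
-- def gv(g):
--     g1 = copy.deepcopy(g)
--     t = ""
--     if (len(g1) > 0):
--         t += g1[0][0]
--         g1 = g1[1:]
--         return t + gv(g1)
--     return ""
-- ===== SOURCE B (Python) =====
-- def gv(g):
--     t = ""
--     for row in g:
--         t += row[0]
--     return t
-- ===== Notes on version B (the rewrite author's own statement) =====
-- stated objective: simpler
-- what changed: Replaced the deepcopy + tail recursion (rebuilding a sliced copy at every level) with a single straight-line accumulation loop over the rows.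
import Mathlib
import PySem

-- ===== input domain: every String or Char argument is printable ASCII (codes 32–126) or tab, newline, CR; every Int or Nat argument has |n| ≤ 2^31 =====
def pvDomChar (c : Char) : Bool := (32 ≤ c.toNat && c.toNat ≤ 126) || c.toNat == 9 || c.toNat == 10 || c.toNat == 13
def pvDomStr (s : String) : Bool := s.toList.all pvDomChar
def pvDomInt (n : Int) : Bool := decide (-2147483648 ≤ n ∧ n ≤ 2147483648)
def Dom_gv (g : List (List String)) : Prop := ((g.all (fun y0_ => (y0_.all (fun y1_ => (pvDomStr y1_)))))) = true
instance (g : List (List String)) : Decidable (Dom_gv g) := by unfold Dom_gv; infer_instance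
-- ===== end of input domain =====

-- B replaces A's deepcopy + tail recursion with one straight-line accumulation loop over the rows (simpler).


-- ===== PORT A =====
-- A: if len(g1) > 0, t = g1[0][0]; recurse on g1[1:]. g1[0][0] raises on an empty row
-- (pyGet? = none); that case is excluded by Pre_gv, the .getD "" default is never reached there.
def gv (g : List (List String)) : String :=
  match g with
  | [] => ""
  | r :: rest => ((PySem.List.pyGet? r 0).getD "") ++ gv rest

-- ===== PORT B =====
-- B: t = ""; for row in g: t += row[0]; return t  (left fold over the rows with accumulator t)
def gv_alt (g : List (List String)) : String :=
  g.foldl (fun t r => t ++ (PySem.List.pyGet? r 0).getD "") ""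

-- ===== PRECONDITION & SPEC =====
-- Pre_gv: every row is nonempty (on an empty row both programs raise IndexError at row[0]).
def Pre_gv (g : List (List String)) : Prop := ∀ r ∈ g, r ≠ []
instance (g : List (List String)) : Decidable (Pre_gv g) := by unfold Pre_gv; infer_instance
def pvWitness_gv : List (List String) := [["ab", "c"], ["xy"]]

def Spec_gv (g : List (List String)) (out : String) : Prop := out = gv_alt g
instance (g : List (List String)) (out : String) : Decidable (Spec_gv g out) := by unfold Spec_gv; infer_instance

-- ===== CLAIM (what is proved, stated in full; the proofs are below) =====
def Claim_equal_gv : Prop := ∀ (g : List (List String)), Dom_gv g → Pre_gv g → Spec_gv g (gv g)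

-- ===== LEMMAS AND PROOFS =====
theorem gv_alt_acc (g : List (List String)) (t : String) :
    g.foldl (fun t r => t ++ (PySem.List.pyGet? r 0).getD "") t = t ++ gv g := by
  induction g generalizing t with
  | nil => simp [gv]
  | cons r rest ih => simp [gv, List.foldl, ih, String.append_assoc]

-- ===== VERDICT (by name: the statement is the Claim_ definition above) =====
theorem gv_spec : Claim_equal_gv := by
  intro g _ _
  unfold Spec_gv gv_alt
  simp [gv_alt_acc]
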